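-- pv_equiv track=rewrite | github.com/theHdd4/TrinityFastAPIDjangoReact | TrinityBackendFastAPI/app/features/laboratory/websocket.py | _dedupe_cards
-- ===== SOURCE A (Python) =====
-- def _dedupe_cards(cards: list[dict]) -> list[dict]:
--     """Ensure cards list only contains a single entry per card id.
--
--     We keep the last-seen version of each id while preserving the overall
--     ordering so that broadcasts and persistence do not introduce duplicates
--     when multiple clients send overlapping payloads.
--     """
--
--     if not isinstance(cards, list):
--         return []
--
--     seen_ids = set()
--     deduped_reversed = []
--
--     for card in reversed(cards):
--         card_id = card.get("id") if isinstance(card, dict) else None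
--         if card_id is None or card_id in seen_ids:
--             continue
--         seen_ids.add(card_id)
--         deduped_reversed.append(card)
--
--     return list(reversed(deduped_reversed))
-- ===== SOURCE B (Python) =====
-- def _dedupe_cards(cards: list[dict]) -> list[dict]:
--     """Keep the last-seen card per id, preserving order (recursive formulation)."""
--     if not isinstance(cards, list):
--         return []
--     if not cards:
--         return []
--     head, tail = cards[0], cards[1:]
--     card_id = head.get("id") if isinstance(head, dict) else None
--     deduped_tail = _dedupe_cards(tail)
--     if card_id is None or any(
--         isinstance(c, dict) and c.get("id") == card_id for c in tail
--     ):
--         return deduped_tail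
--     return [head] + deduped_tail
-- ===== Notes on version B (the rewrite author's own statement) =====
-- stated objective: alternative
-- what changed: Replaces the double-reversal plus seen-id set with direct structural recursion on the list: a card is kept exactly when it has an id and no later card carries the same id, so no reversal and no auxiliary set is needed.
import Mathlib
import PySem

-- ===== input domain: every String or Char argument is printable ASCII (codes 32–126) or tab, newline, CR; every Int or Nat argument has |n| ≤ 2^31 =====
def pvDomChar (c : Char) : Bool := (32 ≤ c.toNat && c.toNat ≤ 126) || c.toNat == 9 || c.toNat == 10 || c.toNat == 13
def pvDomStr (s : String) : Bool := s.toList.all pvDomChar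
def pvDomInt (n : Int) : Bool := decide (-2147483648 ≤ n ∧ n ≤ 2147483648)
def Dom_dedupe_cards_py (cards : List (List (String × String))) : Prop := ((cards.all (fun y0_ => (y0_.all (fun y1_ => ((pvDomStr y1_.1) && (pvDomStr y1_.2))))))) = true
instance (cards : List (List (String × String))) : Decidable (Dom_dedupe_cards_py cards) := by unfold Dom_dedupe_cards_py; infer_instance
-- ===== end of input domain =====

-- B replaces A's double reversal + seen-id set with direct structural recursion
-- (keep a card iff it has an id and no later card carries the same id); objective: alternative.

-- ===== PORT A =====
-- card.get("id") (Python dict lookup; shared by both ports as both Pythons call it)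
def cardId (card : List (String × String)) : Option String :=
  (PySem.Dict.mk card).get? "id"

-- one iteration of A's 'for card in reversed(cards)' loop; state = (seen_ids, deduped_reversed)
def dedupeStep (st : PySem.Set String × List (List (String × String)))
    (card : List (String × String)) : PySem.Set String × List (List (String × String)) :=
  match cardId card with
  | none => st
  | some cid =>
      if PySem.Set.contains st.1 cid then st
      else (PySem.Set.add st.1 cid, st.2 ++ [card])

def dedupe_cards_py (cards : List (List (String × String))) : List (List (String × String)) :=
  ((cards.reverse).foldl dedupeStep (PySem.Set.empty, [])).2.reverse

-- ===== PORT B =====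
def dedupe_cards_py_alt : List (List (String × String)) → List (List (String × String))
  | [] => []
  | head :: tail =>
      let dedupedTail := dedupe_cards_py_alt tail
      match cardId head with
      | none => dedupedTail
      | some cid =>
          if tail.any (fun c => cardId c == some cid) then dedupedTail
          else head :: dedupedTail

-- ===== PRECONDITION & SPEC =====
def Spec_dedupe_cards_py (cards : List (List (String × String))) (out : List (List (String × String))) : Prop := out = dedupe_cards_py_alt cards
instance (cards : List (List (String × String))) (out : List (List (String × String))) : Decidable (Spec_dedupe_cards_py cards out) := by unfold Spec_dedupe_cards_py; infer_instance

-- ===== CLAIM (what is proved, stated in full; the proofs are below) =====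
def Claim_equal_dedupe_cards_py : Prop := ∀ (cards : List (List (String × String))), Dom_dedupe_cards_py cards → Spec_dedupe_cards_py cards (dedupe_cards_py cards)

-- ===== LEMMAS AND PROOFS =====

-- After A's loop has consumed cards.reverse: the seen set holds exactly the ids
-- occurring in cards, and the reversed accumulator is B's result on cards.
theorem dedupe_loop_char (cards : List (List (String × String))) :
    (∀ x, x ∈ ((cards.reverse).foldl dedupeStep (PySem.Set.empty, [])).1 ↔
      ∃ c ∈ cards, cardId c = some x)
    ∧ ((cards.reverse).foldl dedupeStep (PySem.Set.empty, [])).2.reverse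
        = dedupe_cards_py_alt cards := by
  induction cards with
  | nil => simp [PySem.Set.empty, dedupe_cards_py_alt]
  | cons head tail ih =>
    obtain ⟨ihmem, ihacc⟩ := ih
    have hrev : (head :: tail).reverse = tail.reverse ++ [head] := by simp
    rw [hrev, List.foldl_append]
    set st := (tail.reverse).foldl dedupeStep (PySem.Set.empty, []) with hst
    simp only [List.foldl_cons, List.foldl_nil]
    cases hid : cardId head with
    | none =>
      have hstep : dedupeStep st head = st := by simp [dedupeStep, hid]
      rw [hstep]
      refine ⟨fun x => ?_, by simp [dedupe_cards_py_alt, hid, ihacc]⟩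
      rw [ihmem x]
      constructor
      · rintro ⟨c, hc, hcx⟩; exact ⟨c, List.mem_cons_of_mem _ hc, hcx⟩
      · rintro ⟨c, hc, hcx⟩
        rcases List.mem_cons.mp hc with rfl | hc
        · exact absurd hcx (by simp [hid])
        · exact ⟨c, hc, hcx⟩
    | some cid =>
      by_cases hmem : cid ∈ st.1
      · have hstep : dedupeStep st head = st := by
          simp [dedupeStep, hid, hmem]
        have hany : tail.any (fun c => cardId c == some cid) = true := by
          rw [List.any_eq_true]
          obtain ⟨c, hc, hcx⟩ := (ihmem cid).mp hmem
          exact ⟨c, hc, by simp [hcx]⟩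
        rw [hstep]
        refine ⟨fun x => ?_, by simp [dedupe_cards_py_alt, hid, hany, ihacc]⟩
        rw [ihmem x]
        constructor
        · rintro ⟨c, hc, hcx⟩; exact ⟨c, List.mem_cons_of_mem _ hc, hcx⟩
        · rintro ⟨c, hc, hcx⟩
          rcases List.mem_cons.mp hc with rfl | hc
          · rw [hid] at hcx
            obtain rfl : cid = x := by injection hcx
            exact (ihmem cid).mp hmem
          · exact ⟨c, hc, hcx⟩
      · have hstep : dedupeStep st head = (PySem.Set.add st.1 cid, st.2 ++ [head]) := by
          simp [dedupeStep, hid, hmem]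
        have hany : tail.any (fun c => cardId c == some cid) = false := by
          rw [← Bool.not_eq_true, List.any_eq_true]
          rintro ⟨c, hc, hcx⟩
          exact hmem ((ihmem cid).mpr ⟨c, hc, by simpa using hcx⟩)
        rw [hstep]
        refine ⟨fun x => ?_, by simp [dedupe_cards_py_alt, hid, hany, ihacc]⟩
        rw [show (x ∈ PySem.Set.add st.1 cid) = (x ∈ st.1 ∨ x = cid) from
              propext (PySem.Set.mem_add st.1 cid x)]
        rw [ihmem x]
        constructor
        · rintro (⟨c, hc, hcx⟩ | rfl)
          · exact ⟨c, List.mem_cons_of_mem _ hc, hcx⟩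
          · exact ⟨head, List.mem_cons_self, hid⟩
        · rintro ⟨c, hc, hcx⟩
          rcases List.mem_cons.mp hc with rfl | hc
          · right
            rw [hid] at hcx
            injection hcx with h
            exact h.symm
          · exact Or.inl ⟨c, hc, hcx⟩

-- ===== VERDICT (by name: the statement is the Claim_ definition above) =====
theorem dedupe_cards_py_spec : Claim_equal_dedupe_cards_py := by
  intro cards _
  unfold Spec_dedupe_cards_py dedupe_cards_py
  exact (dedupe_loop_char cards).2
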